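-- pv_equiv track=rewrite | github.com/tmalsburg/chamois | chamois.py | latin_square_lists
-- ===== SOURCE A (Python) =====
-- from collections import Counter
--
-- def check_latin_square(target_sentences):
--   # Checks that all items have the same number of sentence:
--   if len(set(Counter([x[0] for x in target_sentences]).values())) > 1:
--     raise RuntimeError("All items need to have the same number of sentences.")
--   # Checks that all items have the same conditions:
--   d = dict()
--   for k,v in [(x[0], x[1]) for x in target_sentences]:
--     d.setdefault(k, []).append(v)
--   items = list(d.keys())
--   if len(set([tuple(l) for l in d.values()])) != 1:
--     raise RuntimeError("Latin square design looks unbalanced.")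
--   # Checks that each condition is present only once: (Yes, it's enough
--   # to check one item, because we've already established that all items
--   # have the same number of sentences and the same conditions.)
--   item, conditions = d.popitem()
--   if len(set(conditions)) < len(conditions):
--     raise RuntimeError("At least one condition appears multiple times per item.")
--   return items, conditions
--
-- def latin_square_lists(target_sentences):
--   items, conditions = check_latin_square(target_sentences)
--   target_sentences.sort(key=lambda s:s[1])
--   target_sentences.sort(key=lambda s:s[0])
--   d = {}
--   for s in target_sentences:
--     d.setdefault(s[0], []).append(s)
--   lists = [list() for _ in conditions]
--   offset = 0
--   for i in d.keys():
--     for j,l in enumerate(lists):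
--       l.append(d[i][(j + offset) % len(conditions)])
--     offset += 1
--   return dict(zip(conditions, lists))
-- ===== SOURCE B (Python) =====
-- def latin_square_lists(target_sentences):
--   # Group condition labels by item (insertion order) and validate the design.
--   groups = {}
--   for item, cond in target_sentences:
--     groups.setdefault(item, []).append(cond)
--   if len({tuple(g) for g in groups.values()}) != 1:
--     raise RuntimeError("Latin square design looks unbalanced.")
--   conditions = next(iter(groups.values()))
--   n_cond = len(conditions)
--   if len(set(conditions)) < n_cond:
--     raise RuntimeError("At least one condition appears multiple times per item.")
--   # One in-place stable sort by (item, condition); the sorted list is then a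
--   # flat sequence of blocks of n_cond sentences, one block per item, so each
--   # output list is read off by index arithmetic instead of a dict of lists.
--   target_sentences.sort(key=lambda s: (s[0], s[1]))
--   n_items = len(target_sentences) // n_cond
--   return {conditions[j]: [target_sentences[i * n_cond + (i + j) % n_cond]
--                           for i in range(n_items)]
--           for j in range(n_cond)}
-- ===== Notes on version B (the rewrite author's own statement) =====
-- stated objective: alternative
-- what changed: B keeps the validation but replaces A's two stable sorts plus the rebuilt dict-of-lists with offset loop by a single (item,condition) sort followed by direct flat-index selection target_sentences[i*C + (i+j)%C] over consecutive C-blocks.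
import Mathlib
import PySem

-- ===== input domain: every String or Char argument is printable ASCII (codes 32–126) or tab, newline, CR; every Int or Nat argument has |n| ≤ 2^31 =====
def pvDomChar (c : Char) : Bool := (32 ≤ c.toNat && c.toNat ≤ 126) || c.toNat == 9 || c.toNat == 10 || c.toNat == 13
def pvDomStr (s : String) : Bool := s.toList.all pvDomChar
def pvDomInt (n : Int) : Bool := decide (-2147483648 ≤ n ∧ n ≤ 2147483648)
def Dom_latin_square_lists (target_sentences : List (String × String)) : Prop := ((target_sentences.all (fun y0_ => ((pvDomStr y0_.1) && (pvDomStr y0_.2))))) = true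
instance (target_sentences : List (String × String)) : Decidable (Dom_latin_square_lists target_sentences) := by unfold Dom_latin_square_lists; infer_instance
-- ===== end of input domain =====

-- B replaces A's two stable sorts + dict-of-lists + offset loop by one (item,condition) sort and
-- flat index arithmetic over consecutive blocks.  Both Pythons sort the argument in place (to the
-- same final state); the equivalence proved here is about the RETURN value.

-- ===== PORT A =====
-- transliteration of check_latin_square; `none` = the Python raises RuntimeError
def check_latin_square (target_sentences : List (String × String)) :
    Option (List String × List String) :=
  if (PySem.Set.ofList (PySem.Dict.counter (target_sentences.map (fun x => x.1))).values).length > 1 then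
    none
  else
    let d := target_sentences.foldl
      (fun d p => d.modify p.1 [] (fun l => l ++ [p.2])) PySem.Dict.empty
    let items := d.keys
    if (PySem.Set.ofList d.values).length ≠ 1 then none
    else
      -- d.popitem(): the last item of d (d itself is not used afterwards)
      match d.items.getLast? with
      | none => none  -- unreachable: the previous check forces d ≠ empty
      | some (_, conditions) =>
        if (PySem.Set.ofList conditions).length < conditions.length then none
        else some (items, conditions)

def latin_square_lists (target_sentences : List (String × String)) :
    List (String × List (String × String)) :=
  match check_latin_square target_sentences with
  | none => []  -- the Python raises here; such inputs are outside Pre_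
  | some (_items, conditions) =>
    -- target_sentences.sort(key=s[1]); target_sentences.sort(key=s[0]) (stable, in place)
    let ts2 := PySem.List.sorted (PySem.List.sorted target_sentences (fun s => s.2)) (fun s => s.1)
    let d := ts2.foldl (fun d s => d.modify s.1 [] (fun l => l ++ [s])) PySem.Dict.empty
    let lists : List (List (String × String)) := conditions.map (fun _ => [])
    -- d[i] is ported as d.getD i [] : i ranges over d.keys, so the KeyError branch never fires
    let res := d.keys.foldl
      (fun (acc : List (List (String × String)) × Int) i =>
        ((PySem.List.enumerate acc.1).map
          (fun jl => jl.2 ++ [PySem.List.pyGetD (d.getD i [])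
            (PySem.Int.mod (jl.1 + acc.2) (conditions.length : Int)) ("", "")]),
         acc.2 + 1))
      (lists, (0 : Int))
    (PySem.Dict.ofList (conditions.zip res.1)).items

-- ===== PORT B =====
def latin_square_lists_alt (target_sentences : List (String × String)) :
    List (String × List (String × String)) :=
  let groups := target_sentences.foldl
    (fun d p => d.modify p.1 [] (fun l => l ++ [p.2])) PySem.Dict.empty
  if (PySem.Set.ofList groups.values).length ≠ 1 then []  -- Python raises; outside Pre_
  else
    let conditions := groups.values.headD []
    let nCond := conditions.length
    if (PySem.Set.ofList conditions).length < nCond then []  -- Python raises; outside Pre_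
    else
      let sortedTs := PySem.List.sorted2 target_sentences (fun s => s.1) (fun s => s.2)
      let nItems := target_sentences.length / nCond
      -- range(n) over a nonnegative bound is ported as List.range (exact), indices stay Nat;
      -- (i + j) % nCond on nonnegative ints is Nat %
      (PySem.Dict.ofList ((List.range nCond).map (fun (j : Nat) =>
        (PySem.List.pyGetD conditions (j : Int) "",
         (List.range nItems).map (fun (i : Nat) =>
           PySem.List.pyGetD sortedTs (Int.ofNat (i * nCond + (i + j) % nCond)) ("", "")))))).items

-- ===== PRECONDITION & SPEC =====
-- the per-item sequence of condition labels, in order of appearance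
def pvCondSeq (ts : List (String × String)) (k : String) : List String :=
  (ts.filter (fun p => p.1 == k)).map (fun p => p.2)

-- exactly the inputs on which the Python A returns (does not raise): nonempty, every item has the
-- same condition sequence, and that sequence has no duplicates
def Pre_latin_square_lists (target_sentences : List (String × String)) : Prop :=
  target_sentences ≠ [] ∧
  (∀ p ∈ target_sentences,
    pvCondSeq target_sentences p.1 = pvCondSeq target_sentences (target_sentences.headD ("", "")).1) ∧
  (pvCondSeq target_sentences (target_sentences.headD ("", "")).1).Nodup
instance (target_sentences : List (String × String)) : Decidable (Pre_latin_square_lists target_sentences) := by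
  unfold Pre_latin_square_lists; infer_instance

def pvWitness_latin_square_lists : (List (String × String)) :=
  [("i1", "a"), ("i1", "b"), ("i2", "a"), ("i2", "b")]

def Spec_latin_square_lists (target_sentences : List (String × String))
    (out : List (String × List (String × String))) : Prop :=
  out = latin_square_lists_alt target_sentences
instance (target_sentences : List (String × String)) (out : List (String × List (String × String))) :
    Decidable (Spec_latin_square_lists target_sentences out) := by
  unfold Spec_latin_square_lists; infer_instance

-- ===== CLAIM (what is proved, stated in full; the proofs are below) =====
def Claim_equal_latin_square_lists : Prop :=
  ∀ (target_sentences : List (String × String)), Dom_latin_square_lists target_sentences →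
    Pre_latin_square_lists target_sentences →
    Spec_latin_square_lists target_sentences (latin_square_lists target_sentences)

-- ===== LEMMAS AND PROOFS =====

-- strict lexicographic order on (item, condition) pairs
abbrev Rlex (a b : String × String) : Prop := a.1 < b.1 ∨ (a.1 = b.1 ∧ a.2 < b.2)

theorem Rlex_trans {a b c : String × String} (h1 : Rlex a b) (h2 : Rlex b c) : Rlex a c := by
  rcases h1 with h1 | ⟨e1, l1⟩ <;> rcases h2 with h2 | ⟨e2, l2⟩
  · exact Or.inl (lt_trans h1 h2)
  · exact Or.inl (e2 ▸ h1)
  · exact Or.inl (e1 ▸ h2)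
  · exact Or.inr ⟨e1.trans e2, lt_trans l1 l2⟩

theorem Rlex_tricho {a b : String × String} (h : a ≠ b) : Rlex a b ∨ Rlex b a := by
  rcases lt_trichotomy a.1 b.1 with h1 | h1 | h1
  · exact Or.inl (Or.inl h1)
  · rcases lt_trichotomy a.2 b.2 with h2 | h2 | h2
    · exact Or.inl (Or.inr ⟨h1, h2⟩)
    · exact absurd (Prod.ext h1 h2) h
    · exact Or.inr (Or.inr ⟨h1.symm, h2⟩)
  · exact Or.inr (Or.inl h1)

theorem Rlex_asymm {a b : String × String} (h1 : Rlex a b) (h2 : Rlex b a) : False := by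
  rcases h1 with h1 | ⟨e1, l1⟩ <;> rcases h2 with h2 | ⟨e2, l2⟩
  · exact absurd h2 (lt_asymm h1)
  · exact absurd h1 (e2 ▸ lt_irrefl _)
  · exact absurd h2 (e1 ▸ lt_irrefl _)
  · exact absurd l2 (lt_asymm l1)

-- Set.ofList facts
theorem set_add_cons {α : Type} [BEq α] [LawfulBEq α] (a x : α) (s : List α) (hne : x ≠ a) :
    PySem.Set.add (a :: s) x = a :: PySem.Set.add s x := by
  unfold PySem.Set.add PySem.Set.contains
  have hc : (a :: s).contains x = s.contains x := by
    rw [List.contains_cons]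
    simp [beq_iff_eq, hne]
  rw [hc]
  by_cases h : s.contains x = true
  · rw [if_pos h, if_pos h]
  · rw [if_neg h, if_neg h, List.cons_append]

theorem foldl_add_head {α : Type} [BEq α] [LawfulBEq α] (a : α) :
    ∀ (xs s : List α), a ∉ xs →
    xs.foldl PySem.Set.add (a :: s) = a :: xs.foldl PySem.Set.add s := by
  intro xs
  induction xs with
  | nil => intro s _; rfl
  | cons x xt ih =>
    intro s h
    simp only [List.mem_cons, not_or] at h
    show xt.foldl PySem.Set.add (PySem.Set.add (a :: s) x)
        = a :: xt.foldl PySem.Set.add (PySem.Set.add s x)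
    rw [set_add_cons a x s (fun e => h.1 e.symm)]
    exact ih _ h.2

theorem foldl_add_const {α : Type} [BEq α] [LawfulBEq α] (c : α) :
    ∀ (l : List α), (∀ x ∈ l, x = c) → l.foldl PySem.Set.add [c] = [c] := by
  intro l
  induction l with
  | nil => intro _; rfl
  | cons x xt ih =>
    intro h
    have hx : x = c := h x (by simp)
    subst hx
    show xt.foldl PySem.Set.add (PySem.Set.add [x] x) = [x]
    have : PySem.Set.add [x] x = [x] := by
      simp [PySem.Set.add, PySem.Set.contains]
    rw [this]
    exact ih (fun y hy => h y (by simp [hy]))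

theorem ofList_all_eq {α : Type} [BEq α] [LawfulBEq α] (c : α) (l : List α)
    (hne : l ≠ []) (h : ∀ x ∈ l, x = c) : PySem.Set.ofList l = [c] := by
  match l with
  | [] => exact absurd rfl hne
  | x :: t =>
    have hx : x = c := h x (by simp)
    subst hx
    show t.foldl PySem.Set.add (PySem.Set.add [] x) = [x]
    have : PySem.Set.add ([] : List α) x = [x] := by
      simp [PySem.Set.add, PySem.Set.contains]
    rw [this]
    exact foldl_add_const x t (fun y hy => h y (by simp [hy]))

-- stable insertion sort: pairwise invariants
theorem insertBy_stable {k : String × String → String} {R : String × String → String × String → Prop}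
    (x : String × String) :
    ∀ (acc : List (String × String)),
    acc.Pairwise (fun a b => k a ≤ k b) → acc.Pairwise R →
    (∀ a ∈ acc, ¬ k x < k a → R a x) → (∀ a ∈ acc, k x < k a → R x a) →
    (PySem.List.insertBy (fun a b => decide (k a < k b)) x acc).Pairwise R
    ∧ (PySem.List.insertBy (fun a b => decide (k a < k b)) x acc).Pairwise (fun a b => k a ≤ k b) := by
  intro acc
  induction acc with
  | nil => intro _ _ _ _; exact ⟨List.pairwise_singleton _ _, List.pairwise_singleton _ _⟩
  | cons y ys ih =>
    intro hle hR hbef haft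
    by_cases hb : k x < k y
    · have : PySem.List.insertBy (fun a b => decide (k a < k b)) x (y :: ys) = x :: y :: ys := by
        simp [PySem.List.insertBy, hb]
      rw [this]
      have hxall : ∀ z ∈ y :: ys, k x < k z := by
        intro z hz
        rcases List.mem_cons.mp hz with rfl | hz'
        · exact hb
        · exact lt_of_lt_of_le hb (List.rel_of_pairwise_cons hle hz')
      constructor
      · exact List.Pairwise.cons (fun z hz => haft z hz (hxall z hz)) hR
      · exact List.Pairwise.cons (fun z hz => le_of_lt (hxall z hz)) hle
    · have : PySem.List.insertBy (fun a b => decide (k a < k b)) x (y :: ys)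
          = y :: PySem.List.insertBy (fun a b => decide (k a < k b)) x ys := by
        simp [PySem.List.insertBy, hb]
      rw [this]
      have hyx : R y x := hbef y (by simp) hb
      have hyxle : k y ≤ k x := not_lt.mp hb
      obtain ⟨ih1, ih2⟩ := ih (List.Pairwise.of_cons hle) (List.Pairwise.of_cons hR)
        (fun a ha hn => hbef a (by simp [ha]) hn) (fun a ha hn => haft a (by simp [ha]) hn)
      constructor
      · refine List.Pairwise.cons (fun z hz => ?_) ih1
        rcases (PySem.List.mem_insertBy _ x z ys).mp hz with rfl | hz'
        · exact hyx
        · exact List.rel_of_pairwise_cons hR hz'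
      · refine List.Pairwise.cons (fun z hz => ?_) ih2
        rcases (PySem.List.mem_insertBy _ x z ys).mp hz with rfl | hz'
        · exact hyxle
        · exact List.rel_of_pairwise_cons hle hz' 

theorem foldl_insertBy_stable {k : String × String → String}
    {R : String × String → String × String → Prop}
    (hlt : ∀ a b, k a < k b → R a b) :
    ∀ (xs acc : List (String × String)),
    acc.Pairwise (fun a b => k a ≤ k b) → acc.Pairwise R →
    (∀ a ∈ acc, ∀ x ∈ xs, k a = k x → R a x) →
    xs.Pairwise (fun a b => k a = k b → R a b) →
    (xs.foldl (fun acc x => PySem.List.insertBy (fun a b => decide (k a < k b)) x acc) acc).Pairwise R := by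
  intro xs
  induction xs with
  | nil => intro acc _ hR _ _; exact hR
  | cons x xt ih =>
    intro acc hle hR hcross hxs
    have hbef : ∀ a ∈ acc, ¬ k x < k a → R a x := by
      intro a ha hn
      rcases eq_or_lt_of_le (not_lt.mp hn) with he | hl
      · exact hcross a ha x (by simp) he
      · exact hlt a x hl
    obtain ⟨h1, h2⟩ := insertBy_stable x acc hle hR hbef
      (fun a ha h => hlt x a h)
    rw [List.foldl_cons]
    apply ih _ h2 h1
    · intro a ha y hy he
      rcases (PySem.List.mem_insertBy _ x a acc).mp ha with rfl | ha'
      · exact (List.rel_of_pairwise_cons hxs hy) he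
      · exact hcross a ha' y (by simp [hy]) he
    · exact List.Pairwise.of_cons hxs

theorem sortedA_pairwise (ts : List (String × String)) (hnd : ts.Nodup) :
    (PySem.List.sorted (PySem.List.sorted ts (fun s => s.2)) (fun s => s.1)).Pairwise Rlex := by
  have h1le := PySem.List.sorted_pairwise ts (fun s => s.2)
  have hperm := PySem.List.sorted_perm ts (fun s => s.2) false
  have hnd1 : (PySem.List.sorted ts (fun s => s.2)).Nodup := hperm.nodup_iff.mpr hnd
  have hcross : (PySem.List.sorted ts (fun s => s.2)).Pairwise
      (fun a b => a.1 = b.1 → Rlex a b) := by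
    refine (h1le.and hnd1).imp ?_
    rintro a b ⟨hle2, hne⟩ heq
    exact Or.inr ⟨heq, lt_of_le_of_ne hle2 (fun e => hne (Prod.ext heq e))⟩
  rw [PySem.List.sorted_eq_foldl_insertBy]
  exact foldl_insertBy_stable (fun a b h => Or.inl h) _ []
    List.Pairwise.nil List.Pairwise.nil (by simp) hcross

theorem insertBy_lex (x : String × String) :
    ∀ (acc : List (String × String)), acc.Pairwise Rlex → (∀ a ∈ acc, a ≠ x) →
    (PySem.List.insertBy (fun a b => decide (Rlex a b)) x acc).Pairwise Rlex := by
  intro acc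
  induction acc with
  | nil => intro _ _; exact List.pairwise_singleton _ _
  | cons y ys ih =>
    intro hacc hne
    by_cases hb : Rlex x y
    · have : PySem.List.insertBy (fun a b => decide (Rlex a b)) x (y :: ys) = x :: y :: ys := by
        simp [PySem.List.insertBy, hb]
      rw [this]
      refine List.Pairwise.cons (fun z hz => ?_) hacc
      rcases List.mem_cons.mp hz with rfl | hz'
      · exact hb
      · exact Rlex_trans hb (List.rel_of_pairwise_cons hacc hz')
    · have : PySem.List.insertBy (fun a b => decide (Rlex a b)) x (y :: ys)
          = y :: PySem.List.insertBy (fun a b => decide (Rlex a b)) x ys := by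
        simp [PySem.List.insertBy, hb]
      rw [this]
      have hyx : Rlex y x := by
        rcases Rlex_tricho (hne y (by simp)) with h | h
        · exact h
        · exact absurd h hb
      refine List.Pairwise.cons (fun z hz => ?_) (ih (List.Pairwise.of_cons hacc)
        (fun a ha => hne a (by simp [ha])))
      rcases (PySem.List.mem_insertBy _ x z ys).mp hz with rfl | hz'
      · exact hyx
      · exact List.rel_of_pairwise_cons hacc hz'

theorem foldl_insertBy_lex :
    ∀ (xs acc : List (String × String)), acc.Pairwise Rlex →
    (∀ a ∈ acc, ∀ x ∈ xs, a ≠ x) → xs.Pairwise (· ≠ ·) →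
    (xs.foldl (fun acc x => PySem.List.insertBy (fun a b => decide (Rlex a b)) x acc) acc).Pairwise Rlex := by
  intro xs
  induction xs with
  | nil => intro acc h _ _; exact h
  | cons x xt ih =>
    intro acc hacc hne hxs
    rw [List.foldl_cons]
    apply ih _ (insertBy_lex x acc hacc (fun a ha => hne a ha x (by simp)))
    · intro a ha y hy
      rcases (PySem.List.mem_insertBy _ x a acc).mp ha with rfl | ha'
      · exact List.rel_of_pairwise_cons hxs hy
      · exact hne a ha' y (by simp [hy])
    · exact List.Pairwise.of_cons hxs

theorem before2_eq (a b : String × String) :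
    (decide (a.1 < b.1) || (!decide (b.1 < a.1) && decide (a.2 < b.2))) = decide (Rlex a b) := by
  by_cases h1 : a.1 < b.1
  · simp [Rlex, h1]
  · by_cases h2 : b.1 < a.1
    · have : ¬ Rlex a b := by
        rintro (h | ⟨he, _⟩)
        · exact h1 h
        · exact absurd h2 (he ▸ lt_irrefl _)
      simp [h1, h2, this]
    · have he : a.1 = b.1 := le_antisymm (not_lt.mp h2) (not_lt.mp h1)
      by_cases h3 : a.2 < b.2
      · have : Rlex a b := Or.inr ⟨he, h3⟩
        simp [h1, h2, h3, this]
      · have : ¬ Rlex a b := by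
          rintro (h | ⟨_, hl⟩)
          · exact h1 h
          · exact h3 hl
        simp [h1, h2, h3, this]

theorem sortedB_pairwise (ts : List (String × String)) (hnd : ts.Nodup) :
    (PySem.List.sorted2 ts (fun s => s.1) (fun s => s.2)).Pairwise Rlex := by
  have e : PySem.List.sorted2 ts (fun s => s.1) (fun s => s.2)
      = ts.foldl (fun acc x => PySem.List.insertBy
          (fun a b => decide (a.1 < b.1) || (!decide (b.1 < a.1) && decide (a.2 < b.2))) x acc) [] := rfl
  rw [e]
  have e2 : (fun (a b : String × String) =>
      decide (a.1 < b.1) || (!decide (b.1 < a.1) && decide (a.2 < b.2)))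
      = fun a b => decide (Rlex a b) := by
    funext a b; exact before2_eq a b
  rw [e2]
  exact foldl_insertBy_lex ts [] List.Pairwise.nil (by simp) hnd

theorem sortAB (ts : List (String × String)) (hnd : ts.Nodup) :
    PySem.List.sorted (PySem.List.sorted ts (fun s => s.2)) (fun s => s.1)
      = PySem.List.sorted2 ts (fun s => s.1) (fun s => s.2) := by
  refine List.Perm.eq_of_pairwise (fun a b _ _ h1 h2 => (Rlex_asymm h1 h2).elim)
    (sortedA_pairwise ts hnd) (sortedB_pairwise ts hnd) ?_
  exact ((PySem.List.sorted_perm _ _ _).trans (PySem.List.sorted_perm _ _ _)).trans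
    (PySem.List.sorted2_perm ts _ _ _).symm

theorem nodup_of_pre (ts : List (String × String)) (hpre : Pre_latin_square_lists ts) : ts.Nodup := by
  obtain ⟨hne, hall, hnd⟩ := hpre
  rw [List.nodup_iff_count_le_one]
  intro p
  by_contra hcnt
  push Not at hcnt
  have hmem : p ∈ ts := List.count_pos_iff.mp (by omega)
  have key : ts.count p ≤ (pvCondSeq ts p.1).count p.2 := by
    unfold pvCondSeq
    rw [List.count_eq_countP, List.count_eq_countP, List.countP_map, List.countP_filter]
    refine List.countP_mono_left ?_
    intro s _ hs
    have : s = p := by simpa using hs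
    subst this
    simp
  have hle1 : (pvCondSeq ts p.1).count p.2 ≤ 1 := by
    rw [hall p hmem]
    exact List.nodup_iff_count_le_one.mp hnd p.2
  omega

theorem flatMap_congr {α β : Type} {l : List α} {f g : α → List β}
    (h : ∀ x ∈ l, f x = g x) : l.flatMap f = l.flatMap g := by
  induction l with
  | nil => rfl
  | cons x xt ih =>
    rw [List.flatMap_cons, List.flatMap_cons, h x (by simp),
      ih (fun y hy => h y (by simp [hy]))]

-- a fst-sorted list is the concatenation of its per-key filters, keys in first-occurrence order
theorem sorted_fst_flatten :
    ∀ (n : Nat) (l : List (String × String)), l.length ≤ n →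
    l.Pairwise (fun a b => a.1 ≤ b.1) →
    l = (PySem.Set.ofList (l.map (fun p => p.1))).flatMap (fun k => l.filter (fun p => p.1 == k)) := by
  intro n
  induction n with
  | zero =>
    intro l hl _
    have : l = [] := List.length_eq_zero_iff.mp (Nat.le_zero.mp hl)
    subst this; rfl
  | succ m ih =>
    intro l hl hpw
    match l with
    | [] => rfl
    | p :: t =>
      have hsplit : List.takeWhile (fun q => q.1 == p.1) (p :: t)
          ++ List.dropWhile (fun q => q.1 == p.1) (p :: t) = p :: t :=
        List.takeWhile_append_dropWhile
      have htake : List.takeWhile (fun q => q.1 == p.1) (p :: t)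
          = p :: List.takeWhile (fun q => q.1 == p.1) t := by
        simp
      have hdropsub : (List.dropWhile (fun q => q.1 == p.1) (p :: t)).Sublist (p :: t) :=
        List.dropWhile_sublist _
      have hl'pw : (List.dropWhile (fun q => q.1 == p.1) (p :: t)).Pairwise
          (fun a b => a.1 ≤ b.1) := List.Pairwise.sublist hdropsub hpw
      have hlen' : (List.dropWhile (fun q => q.1 == p.1) (p :: t)).length ≤ m := by
        have h1 : List.dropWhile (fun q => q.1 == p.1) (p :: t)
            = List.dropWhile (fun q => q.1 == p.1) t := by
          simp
        have := List.length_dropWhile_le (fun q : String × String => q.1 == p.1) t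
        rw [h1]
        simp at hl
        omega
      have hpall : ∀ q ∈ p :: t, p.1 ≤ q.1 := by
        intro q hq
        rcases List.mem_cons.mp hq with rfl | hq'
        · exact le_refl _
        · exact List.rel_of_pairwise_cons hpw hq'
      have hB1 : ∀ q ∈ List.takeWhile (fun q => q.1 == p.1) (p :: t), q.1 = p.1 := by
        intro q hq
        simpa using List.mem_takeWhile_imp hq
      have hl'ne : ∀ q ∈ List.dropWhile (fun q => q.1 == p.1) (p :: t), q.1 ≠ p.1 := by
        intro q hq
        cases hcase : List.dropWhile (fun q => q.1 == p.1) (p :: t) with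
        | nil => rw [hcase] at hq; exact absurd hq (List.not_mem_nil)
        | cons h' t' =>
          have hh' : (h'.1 == p.1) = false := by
            have := List.head_dropWhile_not (fun q : String × String => q.1 == p.1)
              (l := p :: t) (by simp [hcase])
            simpa [hcase] using this
          have hh'ne : h'.1 ≠ p.1 := by simpa using hh'
          have hh'mem : h' ∈ p :: t := hdropsub.mem (by simp [hcase])
          have hplt : p.1 < h'.1 := lt_of_le_of_ne (hpall h' hh'mem) (Ne.symm hh'ne)
          rw [hcase] at hq
          rcases List.mem_cons.mp hq with rfl | hq'
          · exact hh'ne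
          · have : h'.1 ≤ q.1 := by
              have := hl'pw
              rw [hcase] at this
              exact List.rel_of_pairwise_cons this hq'
            exact fun e => absurd (e ▸ lt_of_lt_of_le hplt this) (lt_irrefl _)
      have hfiltP : (p :: t).filter (fun q => q.1 == p.1)
          = List.takeWhile (fun q => q.1 == p.1) (p :: t) := by
        conv_lhs => rw [← hsplit]
        rw [List.filter_append]
        rw [List.filter_eq_self.mpr (fun q hq => by simp [hB1 q hq])]
        rw [List.filter_eq_nil_iff.mpr (fun q hq => by simp [hl'ne q hq])]
        simp
      have hfiltk : ∀ k, k ≠ p.1 → (p :: t).filter (fun q => q.1 == k)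
          = (List.dropWhile (fun q => q.1 == p.1) (p :: t)).filter (fun q => q.1 == k) := by
        intro k hk
        conv_lhs => rw [← hsplit]
        rw [List.filter_append]
        rw [List.filter_eq_nil_iff.mpr (fun q hq => by simp [hB1 q hq, Ne.symm hk])]
        simp
      have hofl : PySem.Set.ofList ((p :: t).map (fun q => q.1))
          = p.1 :: PySem.Set.ofList
              ((List.dropWhile (fun q => q.1 == p.1) (p :: t)).map (fun q => q.1)) := by
        conv_lhs => rw [← hsplit]
        rw [List.map_append]
        show List.foldl PySem.Set.add [] _ = _
        rw [List.foldl_append]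
        have h1 : List.foldl PySem.Set.add []
            ((List.takeWhile (fun q => q.1 == p.1) (p :: t)).map (fun q => q.1)) = [p.1] := by
          apply ofList_all_eq
          · simp [htake]
          · intro x hx
            rcases List.mem_map.mp hx with ⟨q, hq, rfl⟩
            exact hB1 q hq
        rw [h1]
        exact foldl_add_head p.1 _ []
          (fun hmem => by
            rcases List.mem_map.mp hmem with ⟨q, hq, he⟩
            exact hl'ne q hq he)
      rw [hofl, List.flatMap_cons, hfiltP]
      have hrest : (PySem.Set.ofList
            ((List.dropWhile (fun q => q.1 == p.1) (p :: t)).map (fun q => q.1))).flatMap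
            (fun k => (p :: t).filter (fun q => q.1 == k))
          = (PySem.Set.ofList
            ((List.dropWhile (fun q => q.1 == p.1) (p :: t)).map (fun q => q.1))).flatMap
            (fun k => (List.dropWhile (fun q => q.1 == p.1) (p :: t)).filter
              (fun q => q.1 == k)) := by
        apply flatMap_congr
        intro x hx
        rcases List.mem_map.mp ((PySem.Set.mem_ofList _ _).mp hx) with ⟨q, hq, rfl⟩
        exact hfiltk q.1 (hl'ne q hq)
      rw [hrest, ← ih _ hlen' hl'pw]
      exact hsplit.symm

theorem flatMap_getD (f : String → List (String × String)) (C : Nat) (d : String × String) :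
    ∀ (ks : List String) (i : Nat), i < ks.length → (∀ k ∈ ks, (f k).length = C) →
    ∀ r, r < C → (ks.flatMap f).getD (i * C + r) d = (f (ks.getD i "")).getD r d := by
  intro ks
  induction ks with
  | nil => intro i hi; exact absurd hi (by simp)
  | cons k kt ih =>
    intro i hi hlen r hr
    cases i with
    | zero =>
      rw [List.flatMap_cons]
      have hfk : (f k).length = C := hlen k (by simp)
      rw [Nat.zero_mul, Nat.zero_add]
      rw [List.getD_append _ _ _ r (by omega)]
      simp
    | succ i' =>
      rw [List.flatMap_cons]
      have hfk : (f k).length = C := hlen k (by simp)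
      have hidx : (i' + 1) * C + r = (f k).length + (i' * C + r) := by
        rw [hfk]; ring
      rw [hidx, List.getD_append_right _ _ _ _ (by omega)]
      have : (f k).length + (i' * C + r) - (f k).length = i' * C + r := by omega
      rw [this]
      have := ih i' (by simpa using hi) (fun k' hk' => hlen k' (by simp [hk'])) r hr
      simpa using this

-- row selector used to describe A's inner loop
def pvRow (g : String → Int → String × String) : List String → Int → List (String × String)
  | [], _ => []
  | k :: kt, t => g k t :: pvRow g kt (t + 1)

theorem pvRow_length (g : String → Int → String × String) :
    ∀ (ks : List String) (t : Int), (pvRow g ks t).length = ks.length := by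
  intro ks; induction ks with
  | nil => intro t; rfl
  | cons k kt ih => intro t; simp [pvRow, ih]

theorem pvRow_getElem (g : String → Int → String × String) :
    ∀ (ks : List String) (t : Int) (i : Nat) (h : i < (pvRow g ks t).length),
    (pvRow g ks t)[i] = g (ks.getD i "") (t + i) := by
  intro ks
  induction ks with
  | nil => intro t i h; simp [pvRow] at h
  | cons k kt ih =>
    intro t i h
    cases i with
    | zero => simp [pvRow]
    | succ i' =>
      have h' : i' < (pvRow g kt (t + 1)).length := by
        simpa [pvRow] using h
      show (pvRow g kt (t + 1))[i'] = _
      rw [ih (t + 1) i' h']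
      congr 1
      push_cast
      omega

theorem zipIdx_map_self {β : Type} (ls : List β) (f : β → Nat → β) :
    (ls.zipIdx.map (fun p => f p.1 p.2)).zipIdx = ls.zipIdx.map (fun p => (f p.1 p.2, p.2)) := by
  apply List.ext_getElem
  · simp
  · intro i h1 h2
    simp [List.getElem_zipIdx, List.getElem_map]

theorem loopA (g : String → Int → String × String) :
    ∀ (ks : List String) (ls : List (List (String × String))) (off : Int),
    (ks.foldl
      (fun (acc : List (List (String × String)) × Int) i =>
        ((PySem.List.enumerate acc.1).map (fun jl => jl.2 ++ [g i (jl.1 + acc.2)]), acc.2 + 1))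
      (ls, off)).1
    = ls.zipIdx.map (fun p => p.1 ++ pvRow g ks ((p.2 : Int) + off)) := by
  intro ks
  induction ks with
  | nil =>
    intro ls off
    simp only [List.foldl_nil, pvRow]
    apply List.ext_getElem
    · simp
    · intro i h1 h2
      simp
  | cons k kt ih =>
    intro ls off
    rw [List.foldl_cons]
    have hls' : (PySem.List.enumerate ls).map
        (fun jl => jl.2 ++ [g k (jl.1 + off)])
        = ls.zipIdx.map (fun p => p.1 ++ [g k ((p.2 : Int) + off)]) := by
      rw [PySem.List.enumerate_eq_zipIdx_map]
      rw [List.map_map]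
      apply List.map_congr_left
      intro p _
      simp
    rw [hls', ih]
    rw [zipIdx_map_self ls (fun l j => l ++ [g k ((j : Int) + off)])]
    rw [List.map_map]
    apply List.map_congr_left
    intro p _
    simp only [Function.comp]
    rw [pvRow]
    rw [List.append_assoc, List.singleton_append, ← add_assoc]

-- grouping-dict characterisations
theorem groupg_keys {ν : Type} (ts : List (String × String))
    (f : PySem.Dict String ν → (String × String) → ν → ν) (d0 : ν) :
    (ts.foldl (fun d p => d.modify p.1 d0 (f d p)) PySem.Dict.empty).keys
    = PySem.Set.ofList (ts.map (fun p => p.1)) := by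
  rw [PySem.Dict.keys_foldl_modify_key ts (fun p => p.1) d0 f PySem.Dict.empty]
  simp [PySem.Set.update_nil_left]

theorem groupg_nodup {ν : Type} (ts : List (String × String))
    (f : PySem.Dict String ν → (String × String) → ν → ν) (d0 : ν) :
    (ts.foldl (fun d p => d.modify p.1 d0 (f d p)) PySem.Dict.empty).keys.Nodup := by
  apply PySem.Dict.nodup_keys_foldl_modify_key ts (fun p => p.1) d0 f PySem.Dict.empty
  simp

theorem group_getD (ts : List (String × String)) (c : String) :
    (ts.foldl (fun d p => d.modify p.1 [] (fun l => l ++ [p.2])) PySem.Dict.empty).getD c []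
    = pvCondSeq ts c := by
  rw [PySem.Dict.getD_foldl_modify_append]
  simp [pvCondSeq]

theorem group2_getD (S : List (String × String)) (c : String) :
    (S.foldl (fun d s => d.modify s.1 [] (fun l => l ++ [s])) PySem.Dict.empty).getD c []
    = S.filter (fun s => s.1 == c) := by
  have h : S.foldl (fun d s => d.modify s.1 [] (fun l => l ++ [s])) PySem.Dict.empty
      = (S.map (fun s => (s.1, s))).foldl
          (fun d p => d.modify p.1 [] (fun l => l ++ [p.2])) PySem.Dict.empty := by
    rw [List.foldl_map]
  rw [h, PySem.Dict.getD_foldl_modify_append]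
  simp [List.filter_map, Function.comp_def]

theorem count_map_fst (ts : List (String × String)) (k : String) :
    (ts.map (fun p => p.1)).count k = (pvCondSeq ts k).length := by
  rw [List.count_eq_countP, List.countP_map]
  unfold pvCondSeq
  rw [List.length_map, ← List.countP_eq_length_filter]
  rfl

theorem int_mod_natCast (a b : Nat) :
    PySem.Int.mod (a : Int) (b : Int) = ((a % b : Nat) : Int) := by
  show ((a : Int).fmod (b : Int)) = _
  rw [Int.fmod_eq_emod, if_pos (Or.inl (by positivity)), add_zero]
  push_cast
  rfl

theorem check_eq (ts : List (String × String)) (hpre : Pre_latin_square_lists ts) :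
    check_latin_square ts
    = some (PySem.Set.ofList (ts.map (fun p => p.1)), pvCondSeq ts (ts.headD ("", "")).1) := by
  obtain ⟨hne, hall, hndc⟩ := hpre
  have hp0mem : ts.headD ("", "") ∈ ts := by
    cases ts with
    | nil => exact absurd rfl hne
    | cons p t => simp
  have hks0ne : PySem.Set.ofList (ts.map (fun p => p.1)) ≠ [] := by
    have : (ts.headD ("", "")).1 ∈ PySem.Set.ofList (ts.map (fun p => p.1)) :=
      (PySem.Set.mem_ofList _ _).mpr (List.mem_map.mpr ⟨_, hp0mem, rfl⟩)
    exact List.ne_nil_of_mem this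
  have hcond_all : ∀ k ∈ PySem.Set.ofList (ts.map (fun p => p.1)),
      pvCondSeq ts k = pvCondSeq ts (ts.headD ("", "")).1 := by
    intro k hk
    rcases List.mem_map.mp ((PySem.Set.mem_ofList _ _).mp hk) with ⟨q, hq, rfl⟩
    exact hall q hq
  have hknd := groupg_nodup ts (fun _ p => fun l => l ++ [p.2]) []
  have hkeys := groupg_keys ts (fun _ p => fun l => l ++ [p.2]) []
  have hvals : (ts.foldl (fun d p => d.modify p.1 [] (fun l => l ++ [p.2]))
        PySem.Dict.empty).values
      = (PySem.Set.ofList (ts.map (fun p => p.1))).map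
          (fun _ => pvCondSeq ts (ts.headD ("", "")).1) := by
    rw [PySem.Dict.values_eq_map_keys _ hknd [], hkeys]
    apply List.map_congr_left
    intro k hk
    rw [group_getD]
    exact hcond_all k hk
  have hvset : PySem.Set.ofList (ts.foldl
        (fun d p => d.modify p.1 [] (fun l => l ++ [p.2])) PySem.Dict.empty).values
      = [pvCondSeq ts (ts.headD ("", "")).1] := by
    rw [hvals]
    apply ofList_all_eq
    · simpa using hks0ne
    · intro x hx
      rcases List.mem_map.mp hx with ⟨_, _, rfl⟩
      rfl
  have hcntv : (PySem.Dict.counter (ts.map (fun x => x.1))).values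
      = (PySem.Set.ofList (ts.map (fun p => p.1))).map
          (fun _ => ((pvCondSeq ts (ts.headD ("", "")).1).length : Int)) := by
    show (PySem.Dict.counter (ts.map (fun x => x.1))).items.map (fun p => p.2) = _
    rw [PySem.Dict.items_counter, List.map_map]
    apply List.map_congr_left
    intro k hk
    show ((ts.map (fun p => p.1)).count k : Int) = _
    rw [count_map_fst, hcond_all k hk]
  have hcset : PySem.Set.ofList (PySem.Dict.counter (ts.map (fun x => x.1))).values
      = [((pvCondSeq ts (ts.headD ("", "")).1).length : Int)] := by
    rw [hcntv]
    apply ofList_all_eq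
    · simpa using hks0ne
    · intro x hx
      rcases List.mem_map.mp hx with ⟨_, _, rfl⟩
      rfl
  have hitems : (ts.foldl (fun d p => d.modify p.1 [] (fun l => l ++ [p.2]))
        PySem.Dict.empty).items
      = (PySem.Set.ofList (ts.map (fun p => p.1))).map
          (fun k => (k, pvCondSeq ts k)) := by
    rw [PySem.Dict.items_eq_map_keys _ hknd [], hkeys]
    apply List.map_congr_left
    intro k _
    rw [group_getD]
  have hlast : (ts.foldl (fun d p => d.modify p.1 [] (fun l => l ++ [p.2]))
        PySem.Dict.empty).items.getLast?
      = some ((PySem.Set.ofList (ts.map (fun p => p.1))).getLast hks0ne,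
          pvCondSeq ts (ts.headD ("", "")).1) := by
    rw [hitems, List.getLast?_map, List.getLast?_eq_some_getLast hks0ne]
    simp only [Option.map_some]
    rw [hcond_all _ (List.getLast_mem hks0ne)]
  simp only [check_latin_square]
  rw [hcset, hvset, hlast]
  rw [if_neg (by simp), if_neg (by simp)]
  simp only []
  rw [if_neg (by rw [PySem.Set.ofList_eq_self_of_nodup _ hndc]; omega)]
  rw [hkeys]

theorem main_eq (ts : List (String × String)) (hpre : Pre_latin_square_lists ts) :
    latin_square_lists ts = latin_square_lists_alt ts := by
  obtain ⟨hne, hall, hndc⟩ := hpre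
  have hp0mem : ts.headD ("", "") ∈ ts := by
    cases ts with
    | nil => exact absurd rfl hne
    | cons p t => simp
  have hCpos : 0 < (pvCondSeq ts (ts.headD ("", "")).1).length := by
    have : (ts.headD ("", "")).2 ∈ pvCondSeq ts (ts.headD ("", "")).1 := by
      unfold pvCondSeq
      exact List.mem_map.mpr ⟨_, List.mem_filter.mpr ⟨hp0mem, by simp⟩, rfl⟩
    exact List.length_pos_of_mem this
  have hndts : ts.Nodup := nodup_of_pre ts ⟨hne, hall, hndc⟩
  -- the A side: reduce check_latin_square
  rw [latin_square_lists, check_eq ts ⟨hne, hall, hndc⟩]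
  -- the B side: reduce the two guards
  rw [latin_square_lists_alt]
  have hknd := groupg_nodup ts (fun _ p => fun l => l ++ [p.2]) []
  have hkeys := groupg_keys ts (fun _ p => fun l => l ++ [p.2]) []
  have hks0ne : PySem.Set.ofList (ts.map (fun p => p.1)) ≠ [] := by
    have : (ts.headD ("", "")).1 ∈ PySem.Set.ofList (ts.map (fun p => p.1)) :=
      (PySem.Set.mem_ofList _ _).mpr (List.mem_map.mpr ⟨_, hp0mem, rfl⟩)
    exact List.ne_nil_of_mem this
  have hcond_all : ∀ k ∈ PySem.Set.ofList (ts.map (fun p => p.1)),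
      pvCondSeq ts k = pvCondSeq ts (ts.headD ("", "")).1 := by
    intro k hk
    rcases List.mem_map.mp ((PySem.Set.mem_ofList _ _).mp hk) with ⟨q, hq, rfl⟩
    exact hall q hq
  have hvals : (ts.foldl (fun d p => d.modify p.1 [] (fun l => l ++ [p.2]))
        PySem.Dict.empty).values
      = (PySem.Set.ofList (ts.map (fun p => p.1))).map
          (fun _ => pvCondSeq ts (ts.headD ("", "")).1) := by
    rw [PySem.Dict.values_eq_map_keys _ hknd [], hkeys]
    apply List.map_congr_left
    intro k hk
    rw [group_getD]
    exact hcond_all k hk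
  have hvset : PySem.Set.ofList (ts.foldl
        (fun d p => d.modify p.1 [] (fun l => l ++ [p.2])) PySem.Dict.empty).values
      = [pvCondSeq ts (ts.headD ("", "")).1] := by
    rw [hvals]
    apply ofList_all_eq
    · simpa using hks0ne
    · intro x hx
      rcases List.mem_map.mp hx with ⟨_, _, rfl⟩
      rfl
  have hhead : (ts.foldl (fun d p => d.modify p.1 [] (fun l => l ++ [p.2]))
        PySem.Dict.empty).values.headD []
      = pvCondSeq ts (ts.headD ("", "")).1 := by
    rw [hvals]
    cases hcase : PySem.Set.ofList (ts.map (fun p => p.1)) with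
    | nil => exact absurd hcase hks0ne
    | cons k kt => simp
  rw [hvset]
  rw [if_neg (by simp)]
  simp only [hhead]
  rw [if_neg (by rw [PySem.Set.ofList_eq_self_of_nodup _ hndc]; omega)]
  -- both sides now talk about the same sorted list S
  rw [← sortAB ts hndts]
  -- names for the core objects
  set conds := pvCondSeq ts (ts.headD ("", "")).1 with hconds
  set C := conds.length with hCdef
  set S := PySem.List.sorted (PySem.List.sorted ts (fun s => s.2)) (fun s => s.1) with hSdef
  set ksS := PySem.Set.ofList (S.map (fun p => p.1)) with hksS
  have hSpw : S.Pairwise Rlex := sortedA_pairwise ts hndts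
  have hfstpw : S.Pairwise (fun a b => a.1 ≤ b.1) := by
    refine hSpw.imp ?_
    rintro a b (h | ⟨he, _⟩)
    · exact le_of_lt h
    · exact le_of_eq he
  have hpermS : S.Perm ts :=
    (PySem.List.sorted_perm _ _ _).trans (PySem.List.sorted_perm _ _ _)
  have hd2keys : (S.foldl (fun d s => d.modify s.1 [] (fun l => l ++ [s]))
      PySem.Dict.empty).keys = ksS := groupg_keys S (fun _ s => fun l => l ++ [s]) []
  have hflat : S = ksS.flatMap (fun k => S.filter (fun q => q.1 == k)) :=
    sorted_fst_flatten S.length S le_rfl hfstpw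
  have hblk : ∀ k ∈ ksS, (S.filter (fun q => q.1 == k)).length = C := by
    intro k hk
    rcases List.mem_map.mp ((PySem.Set.mem_ofList _ _).mp hk) with ⟨q, hqS, rfl⟩
    have hqts : q ∈ ts := hpermS.subset hqS
    have h1 : (S.filter (fun x => x.1 == q.1)).length
        = (ts.filter (fun x => x.1 == q.1)).length :=
      (List.Perm.filter _ hpermS).length_eq
    rw [h1]
    have h2 : (ts.filter (fun x => x.1 == q.1)).length = (pvCondSeq ts q.1).length := by
      unfold pvCondSeq
      rw [List.length_map]
    rw [h2, hall q hqts]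
  have hlenS : S.length = ksS.length * C := by
    conv_lhs => rw [hflat]
    rw [List.length_flatMap]
    rw [List.map_congr_left (fun k hk => hblk k hk)]
    rw [List.map_const', List.sum_replicate, smul_eq_mul]
  have hnval : ts.length / C = ksS.length := by
    rw [← hpermS.length_eq, hlenS, Nat.mul_div_cancel _ hCpos]
  -- the A-side loop, described by pvRow
  have hres := loopA
    (fun i t => PySem.List.pyGetD
      ((S.foldl (fun d s => d.modify s.1 [] (fun l => l ++ [s])) PySem.Dict.empty).getD i [])
      (PySem.Int.mod t (C : Int)) ("", ""))
    (S.foldl (fun d s => d.modify s.1 [] (fun l => l ++ [s])) PySem.Dict.empty).keys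
    (conds.map (fun _ => [])) 0
  apply congrArg (fun l => (PySem.Dict.ofList l).items)
  rw [hres]
  simp only [hd2keys, group2_getD]
  apply List.ext_getElem
  · simp [hCdef]
  · intro j hj1 hj2
    have hjC : j < C := by simpa [← hCdef] using hj2
    rw [List.getElem_zip]
    simp only [List.getElem_map, List.getElem_zipIdx, List.getElem_range, List.nil_append,
      Nat.zero_add]
    refine Prod.ext ?_ ?_
    · show conds[j] = PySem.List.pyGetD conds ((j : Nat) : Int) ""
      rw [PySem.List.pyGetD_natCast, List.getD_eq_getElem _ _ hjC]
    · show pvRow _ ksS ((j : Nat) + (0 : Int)) = _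
      apply List.ext_getElem
      · rw [pvRow_length]
        simp [hnval]
      · intro i hi1 hi2
        have hiK : i < ksS.length := by
          rw [pvRow_length] at hi1
          exact hi1
        rw [List.getElem_map, List.getElem_range]
        rw [pvRow_getElem _ _ _ _ hi1]
        have hkmem : ksS.getD i "" ∈ ksS := by
          rw [List.getD_eq_getElem _ _ hiK]
          exact List.getElem_mem hiK
        have harith : (((j : Nat) : Int) + (0 : Int) + (i : Nat)) = ((j + i : Nat) : Int) := by
          push_cast
          omega
        rw [harith, int_mod_natCast, PySem.List.pyGetD_natCast]
        have hrhs : PySem.List.pyGetD S (Int.ofNat (i * C + (i + j) % C)) ("", "")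
            = (S.filter (fun q => q.1 == ksS.getD i "")).getD ((i + j) % C) ("", "") := by
          show PySem.List.pyGetD S ((i * C + (i + j) % C : Nat) : Int) ("", "") = _
          rw [PySem.List.pyGetD_natCast]
          conv_lhs => rw [hflat]
          exact flatMap_getD _ C ("", "") ksS i hiK hblk _ (Nat.mod_lt _ hCpos)
        rw [hrhs]
        rw [Nat.add_comm j i]

-- ===== VERDICT (by name: the statement is the Claim_ definition above) =====
theorem latin_square_lists_spec : Claim_equal_latin_square_lists := by
  intro ts _ hpre
  show latin_square_lists ts = latin_square_lists_alt ts
  exact main_eq ts hpre
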